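-- pv_equiv track=rewrite | github.com/nverbic/python-days-of-code | src/12 Day/reverse_string.py | reverse_text
-- ===== SOURCE A (Python) =====
-- def reverse_text(text):
--     ''' Reverse text '''
--     lines_reversed = []
--     end_punctuation = ".?!"
--
--     for line in text:
--         # Remove end punctuation
--         if line[-1] in end_punctuation:
--             line = line[:-1]
--         # Create the list of words
--         words = line.split()
--         # Reverse the individual words in the sentence
--         reversed_words = [word[::-1] for word in words]
--         # Join the words in the sentence
--         lines_reversed.append(' '.join(reversed_words))
--
--     return lines_reversed
-- ===== SOURCE B (Python) =====
-- def reverse_text(text):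
--     ''' Reverse text (single pass per line: build each word reversed by prepending) '''
--     result = []
--     for line in text:
--         if line[-1] in ".?!":
--             line = line[:-1]
--         pieces = []
--         rev = ''
--         for ch in line:
--             if ch.isspace():
--                 if rev:
--                     pieces.append(rev)
--                     rev = ''
--             else:
--                 rev = ch + rev
--         if rev:
--             pieces.append(rev)
--         result.append(' '.join(pieces))
--     return result
-- ===== Notes on version B (the rewrite author's own statement) =====
-- stated objective: alternative
-- what changed: Replaces A's split()/per-word-slice-reverse/join pipeline with a single character scan per line that builds each word already reversed by prepending characters, flushing words at whitespace.
import Mathlib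
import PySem

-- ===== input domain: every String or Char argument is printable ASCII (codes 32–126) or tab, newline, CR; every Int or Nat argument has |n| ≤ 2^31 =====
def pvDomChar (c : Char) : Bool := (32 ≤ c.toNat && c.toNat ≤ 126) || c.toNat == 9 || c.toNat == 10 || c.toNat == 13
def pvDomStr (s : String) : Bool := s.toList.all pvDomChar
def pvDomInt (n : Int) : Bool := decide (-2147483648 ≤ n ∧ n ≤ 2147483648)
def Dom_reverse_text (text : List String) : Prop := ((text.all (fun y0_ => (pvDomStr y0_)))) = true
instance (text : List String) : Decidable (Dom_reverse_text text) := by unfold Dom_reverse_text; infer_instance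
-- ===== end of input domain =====

-- B replaces A's split/word-slice/join pipeline with a single character scan per line; objective: alternative.

-- ===== PORT A =====
-- strip a trailing '.', '?' or '!' (shared source line of A and B: `if line[-1] in ".?!": line = line[:-1]`)
def pvStrip (line : String) : String :=
  match PySem.Str.pyGet? line (-1) with
  | some c => if c ∈ ['.', '?', '!'] then PySem.Str.slice line none (some (-1)) else line
  | none => line   -- Python raises IndexError here (empty line); excluded by Pre_

def reverse_text (text : List String) : List String :=
  text.foldl (fun lines_reversed line =>
    let line := pvStrip line
    let words := PySem.Str.split₀ line
    -- word[::-1]; slice? with step -1 is always `some`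
    let reversed_words := words.map (fun w => (PySem.Str.slice? w none none (-1)).getD w)
    lines_reversed ++ [PySem.Str.join " " reversed_words]) []

-- ===== PORT B =====
-- inner char loop of B: `rev` holds the current word already reversed (built by prepending)
def bScan (chars : List Char) (rev : List Char) (pieces : List String) : List String :=
  match chars with
  | [] => if rev.isEmpty then pieces else pieces ++ [String.ofList rev]
  | c :: rest =>
    if PySem.Str.isspace c then
      if rev.isEmpty then bScan rest [] pieces
      else bScan rest [] (pieces ++ [String.ofList rev])
    else bScan rest (c :: rev) pieces

def reverse_text_alt (text : List String) : List String :=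
  text.foldl (fun result line =>
    let line := pvStrip line
    result ++ [PySem.Str.join " " (bScan line.toList [] [])]) []

-- ===== PRECONDITION & SPEC =====
-- Pre_ excludes texts containing an empty line: there `line[-1]` raises IndexError in both A and B.
def Pre_reverse_text (text : List String) : Prop := (text.all (fun l => !l.isEmpty)) = true
instance (text : List String) : Decidable (Pre_reverse_text text) := by unfold Pre_reverse_text; infer_instance
def pvWitness_reverse_text : List String := ["ab  cd.", "Hello world!"]

def Spec_reverse_text (text : List String) (out : List String) : Prop := out = reverse_text_alt text
instance (text : List String) (out : List String) : Decidable (Spec_reverse_text text out) := by unfold Spec_reverse_text; infer_instance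

-- ===== CLAIM (what is proved, stated in full; the proofs are below) =====
def Claim_equal_reverse_text : Prop := ∀ (text : List String), Dom_reverse_text text → Pre_reverse_text text → Spec_reverse_text text (reverse_text text)

-- ===== LEMMAS AND PROOFS =====

-- split₀.go threads its output accumulator `acc` reversed in front of the remainder
theorem go_acc (s cur acc) : PySem.Chars.split₀.go s cur acc = acc.reverse ++ PySem.Chars.split₀.go s cur [] := by
  induction s generalizing cur acc with
  | nil => simp [PySem.Chars.split₀.go]; split <;> simp
  | cons c rest ih =>
    simp only [PySem.Chars.split₀.go]
    split
    · split
      · exact ih _ _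
      · rw [ih [] (cur.reverse :: acc), ih [] [cur.reverse]]; simp
    · exact ih _ _

-- B's scan produces exactly the words split₀.go produces, each reversed, appended after `pieces`
theorem bScan_eq (s cur pieces) :
    bScan s cur pieces
      = pieces ++ (PySem.Chars.split₀.go s cur []).map (fun w => String.ofList w.reverse) := by
  induction s generalizing cur pieces with
  | nil =>
    simp only [bScan, PySem.Chars.split₀.go]
    split <;> simp
  | cons c rest ih =>
    simp only [bScan, PySem.Chars.split₀.go, PySem.Str.isspace]
    split
    · split
      · exact ih _ _
      · rw [ih [] _, go_acc rest [] [cur.reverse]]; simp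
    · exact ih _ _

-- per-line agreement
theorem line_eq (line : String) :
    PySem.Str.join " " ((PySem.Str.split₀ line).map (fun w => (PySem.Str.slice? w none none (-1)).getD w))
      = PySem.Str.join " " (bScan line.toList [] []) := by
  rw [bScan_eq]
  show PySem.Str.join " " (((PySem.Chars.split₀ line.toList).map String.ofList).map _) = _
  congr 1
  simp [PySem.Str.slice?_none_none_neg_one, PySem.Chars.split₀, Function.comp]

theorem reverse_text_spec : Claim_equal_reverse_text := by
  intro text _ _
  show reverse_text text = reverse_text_alt text
  simp only [reverse_text, reverse_text_alt, line_eq]
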